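-- pv_equiv track=rewrite | github.com/etssu/prog1 | exam_prep.py | F
-- ===== SOURCE A (Python) =====
-- def F(a):
--     sums = []
--     count = 0
--     for col in range(len(a[0])):
--         sucet = 0
--         for row in range(len(a)):
--             sucet += a[row][col]
--         sums.append(sucet)
--
--     unique_sums = set()
--     for j in sums:              #j is one sum from the list
--         if j in unique_sums:
--             count += 1
--             if count >= 1:
--                 return True
--         unique_sums.add(j)
--     return False
-- ===== SOURCE B (Python) =====
-- def F(a):
--     sums = [sum(row[col] for row in a) for col in range(len(a[0]))]
--     sums.sort()
--     return any(x == y for x, y in zip(sums, sums[1:]))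
-- ===== Notes on version B (the rewrite author's own statement) =====
-- stated objective: alternative
-- what changed: Duplicate detection over the column sums is done by sorting the sums and scanning adjacent pairs instead of A's incremental hash-set with early exit; the column sums themselves come from a comprehension folding over the rows directly instead of indexing by range(len(a)).
import Mathlib
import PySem

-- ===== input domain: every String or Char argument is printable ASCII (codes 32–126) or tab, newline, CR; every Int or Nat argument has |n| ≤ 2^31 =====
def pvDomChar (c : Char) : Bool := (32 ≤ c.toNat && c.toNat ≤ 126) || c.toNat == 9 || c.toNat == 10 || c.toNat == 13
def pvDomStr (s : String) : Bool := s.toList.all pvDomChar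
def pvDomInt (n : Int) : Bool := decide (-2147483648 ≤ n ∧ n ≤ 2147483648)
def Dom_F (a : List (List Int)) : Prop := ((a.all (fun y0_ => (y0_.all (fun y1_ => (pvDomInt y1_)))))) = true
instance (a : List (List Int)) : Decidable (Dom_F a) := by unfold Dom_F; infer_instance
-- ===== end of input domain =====

-- B replaces A's incremental hash-set duplicate check on the column sums by sort-then-adjacent-scan; alternative decomposition, no speed claim.

-- ===== PORT A =====
-- A's second loop: set membership with early return True on the first repeat
def dupLoopA : List Int → PySem.Set Int → Bool
  | [], _ => false
  | j :: rest, s =>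
      if PySem.Set.contains s j then true else dupLoopA rest (PySem.Set.add s j)

def F (a : List (List Int)) : Bool :=
  let sums := (PySem.List.pyRange 0 (PySem.List.len ((PySem.List.pyGet? a 0).getD []))).foldl
    (fun acc col =>
      acc ++ [(PySem.List.pyRange 0 (PySem.List.len a)).foldl
        (fun sucet row => sucet + PySem.List.pyGetD (PySem.List.pyGetD a row []) col 0) 0]) []
  dupLoopA sums PySem.Set.empty

-- ===== PORT B =====
def F_alt (a : List (List Int)) : Bool :=
  let sums := (PySem.List.pyRange 0 (PySem.List.len ((PySem.List.pyGet? a 0).getD []))).map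
    (fun col => a.foldl (fun s row => s + PySem.List.pyGetD row col 0) 0)
  let ss := PySem.List.sorted sums (fun x => x)
  (ss.zip (PySem.List.slice ss (some 1))).any (fun p => p.1 == p.2)

-- ===== PRECONDITION & SPEC =====
-- Pre_ excludes exactly the inputs on which Python raises IndexError: the empty matrix
-- (a[0]) and matrices where some row is shorter than the first row (a[row][col]).
def Pre_F (a : List (List Int)) : Prop :=
  a ≠ [] ∧ ∀ row ∈ a, ((PySem.List.pyGet? a 0).getD []).length ≤ row.length
instance (a : List (List Int)) : Decidable (Pre_F a) := by unfold Pre_F; infer_instance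

def pvWitness_F : List (List Int) := [[1, 2], [3, 4]]

def Spec_F (a : List (List Int)) (out : Bool) : Prop := out = F_alt a
instance (a : List (List Int)) (out : Bool) : Decidable (Spec_F a out) := by unfold Spec_F; infer_instance

-- ===== CLAIM (what is proved, stated in full; the proofs are below) =====
def Claim_equal_F : Prop := ∀ (a : List (List Int)), Dom_F a → Pre_F a → Spec_F a (F a)

-- ===== LEMMAS AND PROOFS =====

-- A's set loop returns true iff the list has a repeat or hits the already-seen set
theorem dupLoopA_true_iff (l : List Int) (s : PySem.Set Int) :
    dupLoopA l s = true ↔ ¬ l.Nodup ∨ ∃ x ∈ l, x ∈ s := by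
  induction l generalizing s with
  | nil => simp [dupLoopA]
  | cons j rest ih =>
    by_cases h : j ∈ s
    · have hc : PySem.Set.contains s j = true := by simpa [PySem.Set.contains] using h
      simp only [dupLoopA, hc, if_true, true_iff]
      exact Or.inr ⟨j, List.mem_cons_self .., h⟩
    · have hc : ¬ (PySem.Set.contains s j = true) := by simpa [PySem.Set.contains] using h
      have hstep : dupLoopA (j :: rest) s = dupLoopA rest (PySem.Set.add s j) := by
        simp only [dupLoopA]
        rw [if_neg hc]
      rw [hstep, ih, List.nodup_cons]
      simp only [PySem.Set.mem_add, List.mem_cons, not_and]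
      constructor
      · rintro (hnd | ⟨x, hx, (hxs | rfl)⟩)
        · tauto
        · exact Or.inr ⟨x, Or.inr hx, hxs⟩
        · tauto
      · rintro (hj | ⟨x, (rfl | hx), hxs⟩)
        · by_cases hjr : j ∈ rest
          · exact Or.inr ⟨j, hjr, Or.inr rfl⟩
          · exact Or.inl (fun hr => hj hjr hr)
        · exact absurd hxs h
        · exact Or.inr ⟨x, hx, Or.inl hxs⟩

-- adjacent-pair scan on a (≤)-sorted list detects exactly the duplicates
theorem adjScan_iff (l : List Int) (hs : l.Pairwise (· ≤ ·)) :
    ((l.zip (l.drop 1)).any (fun p => p.1 == p.2) = true) ↔ ¬ l.Nodup := by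
  induction l with
  | nil => simp
  | cons x t ih =>
    cases t with
    | nil => simp
    | cons y t' =>
      rw [List.pairwise_cons] at hs
      obtain ⟨hx, hrest⟩ := hs
      have hxy : x ≤ y := hx y (List.mem_cons_self ..)
      simp only [List.drop_succ_cons, List.drop_zero] at ih ⊢
      simp only [List.zip_cons_cons, List.any_cons]
      by_cases hexy : x = y
      · subst hexy
        simp [List.nodup_cons]
      · have hxnot : x ∉ y :: t' := by
          intro hmem
          rcases List.mem_cons.mp hmem with rfl | hmem'
          · exact hexy rfl
          · have hyx : y ≤ x := (List.pairwise_cons.mp hrest).1 x hmem'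
            exact hexy (le_antisymm hxy hyx)
        simp only [Bool.or_eq_true, beq_iff_eq, hexy, false_or]
        rw [ih hrest]
        simp [List.nodup_cons, hxnot]

-- both ports compute the same list of column sums
theorem sums_eq (a : List (List Int)) :
    (PySem.List.pyRange 0 (PySem.List.len ((PySem.List.pyGet? a 0).getD []))).foldl
      (fun acc col =>
        acc ++ [(PySem.List.pyRange 0 (PySem.List.len a)).foldl
          (fun sucet row => sucet + PySem.List.pyGetD (PySem.List.pyGetD a row []) col 0) 0]) []
    = (PySem.List.pyRange 0 (PySem.List.len ((PySem.List.pyGet? a 0).getD []))).map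
      (fun col => a.foldl (fun s row => s + PySem.List.pyGetD row col 0) 0) := by
  rw [PySem.List.foldl_append_singleton_eq_map]
  rw [List.nil_append]
  apply List.map_congr_left
  intro col _
  rw [PySem.List.foldl_add, PySem.List.foldl_add]
  have : (PySem.List.pyRange 0 (PySem.List.len a)).map
      (fun row => PySem.List.pyGetD (PySem.List.pyGetD a row []) col 0)
    = (a.map (fun row => PySem.List.pyGetD row col 0)) := by
    have h := PySem.List.map_pyGetD_pyRange_zero a ([] : List Int)
    conv_rhs => rw [← h]
    rw [List.map_map]
    rfl
  rw [this]

-- ===== VERDICT (by name: the statement is the Claim_ definition above) =====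
theorem F_spec : Claim_equal_F := by
  intro a _ _
  unfold Spec_F F F_alt
  simp only [sums_eq a]
  set S := (PySem.List.pyRange 0 (PySem.List.len ((PySem.List.pyGet? a 0).getD []))).map
      (fun col => a.foldl (fun s row => s + PySem.List.pyGetD row col 0) 0) with hS
  have h1 : dupLoopA S PySem.Set.empty = true ↔ ¬ S.Nodup := by
    rw [dupLoopA_true_iff]
    simp [PySem.Set.empty]
  have hperm := PySem.List.sorted_perm S (fun x => x) false
  have hpw : (PySem.List.sorted S (fun x => x)).Pairwise (· ≤ ·) := by
    simpa using PySem.List.sorted_pairwise S (fun x => x)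
  have h2 : (((PySem.List.sorted S (fun x => x)).zip
        (PySem.List.slice (PySem.List.sorted S (fun x => x)) (some 1))).any
        (fun p => p.1 == p.2) = true) ↔ ¬ S.Nodup := by
    rw [PySem.List.slice_from _ (by norm_num : (0:Int) ≤ 1)]
    simp only [Int.toNat_one]
    rw [adjScan_iff _ hpw]
    rw [hperm.nodup_iff]
  rw [Bool.eq_iff_iff, h1, h2]
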